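-- pv_equiv track=rewrite | github.com/porseleyn/UF_Thesis_Analyses | data_batch_cleaner.py | subtract_timeouts
-- ===== SOURCE A (Python) =====
-- def subtract_timeouts(possessions, timeouts):
--     clean_durations = []
--     for start, stop in possessions:
--         duration = stop - start
--         for t_start, t_stop in timeouts:
--             overlap_start = max(start, t_start)
--             overlap_end = min(stop, t_stop)
--             if overlap_start < overlap_end:
--                 duration -= (overlap_end - overlap_start)
--         clean_durations.append(duration)
--     return clean_durations
-- ===== SOURCE B (Python) =====
-- def _bisect_left(vals, x):
--     lo, hi = 0, len(vals)
--     while lo < hi: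
--         mid = (lo + hi) // 2
--         if vals[mid] < x:
--             lo = mid + 1
--         else:
--             hi = mid
--     return lo
--
--
-- def subtract_timeouts(possessions, timeouts):
--     # Coverage-function algorithm: let C(x) = total (multiplicity-counted) length
--     # of timeout time below coordinate x.  For a possession [start, stop] with
--     # start <= stop, the overlap to subtract is C(stop) - C(start).  C is queried
--     # in O(log T) from the sorted timeout endpoints and their prefix sums, since
--     # sum(min(x, v) for v in vals) = pre[k] + x * (n - k) with k = bisect_left(vals, x).
--     valid = [t for t in timeouts if t[0] < t[1]]
--     starts = sorted(t[0] for t in valid)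
--     stops = sorted(t[1] for t in valid)
--     pre_starts = [0]
--     for v in starts:
--         pre_starts.append(pre_starts[-1] + v)
--     pre_stops = [0]
--     for v in stops:
--         pre_stops.append(pre_stops[-1] + v)
--     n = len(valid)
--
--     def summin(vals, pre, x):
--         # sum(min(x, v) for v in vals); vals is sorted, pre its prefix sums
--         k = _bisect_left(vals, x)
--         return pre[k] + x * (n - k)
--
--     def cov(x):
--         return summin(stops, pre_stops, x) - summin(starts, pre_starts, x)
--
--     out = []
--     for start, stop in possessions:
--         if start <= stop:
--             out.append((stop - start) - (cov(stop) - cov(start)))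
--         else:
--             out.append(stop - start)
--     return out
-- ===== Notes on version B (the rewrite author's own statement) =====
-- stated objective: faster
-- what changed: B replaces A's per-possession scan over all timeouts by a coverage function C(x) = sum over valid timeouts of max(0, min(x, t_stop) - t_start): it filters degenerate timeouts, sorts the start and stop endpoints, builds prefix sums, and answers each possession's overlap as C(stop) - C(start) with two binary searches per endpoint.
import Mathlib
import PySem

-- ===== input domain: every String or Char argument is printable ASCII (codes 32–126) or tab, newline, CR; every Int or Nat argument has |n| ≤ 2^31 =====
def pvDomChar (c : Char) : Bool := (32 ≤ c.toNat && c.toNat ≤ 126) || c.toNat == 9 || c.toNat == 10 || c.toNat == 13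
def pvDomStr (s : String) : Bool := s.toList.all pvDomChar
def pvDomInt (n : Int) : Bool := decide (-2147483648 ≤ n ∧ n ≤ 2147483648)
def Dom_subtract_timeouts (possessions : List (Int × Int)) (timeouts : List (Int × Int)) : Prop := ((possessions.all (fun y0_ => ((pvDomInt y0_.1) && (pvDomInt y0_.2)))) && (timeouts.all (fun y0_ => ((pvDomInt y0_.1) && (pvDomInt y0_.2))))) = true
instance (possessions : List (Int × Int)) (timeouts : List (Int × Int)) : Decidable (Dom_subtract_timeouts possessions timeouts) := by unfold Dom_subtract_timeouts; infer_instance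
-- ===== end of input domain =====

-- B replaces A's per-possession scan of all timeouts by a coverage function C(x) (total timeout
-- length below x) answered from sorted endpoints + prefix sums + binary search; objective: faster.

-- ===== PORT A =====
def subtract_timeouts (possessions : List (Int × Int)) (timeouts : List (Int × Int)) : List Int :=
  possessions.foldl (fun clean_durations p =>
    let start := p.1
    let stop := p.2
    let duration := timeouts.foldl (fun duration t =>
      let overlap_start := max start t.1
      let overlap_end := min stop t.2
      if overlap_start < overlap_end then duration - (overlap_end - overlap_start) else duration)
      (stop - start)
    clean_durations ++ [duration]) []

-- ===== PORT B =====
-- pre = [0]; for v in vals: pre.append(pre[-1] + v)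
def pvBuildPre (vals : List Int) : List Int :=
  vals.foldl (fun pre v => pre ++ [(PySem.List.pyGet? pre (-1)).getD 0 + v]) [0]

-- summin(vals, pre, x) = pre[k] + x * (n - k) with k = _bisect_left(vals, x)
-- (_bisect_left in Source B is the textbook bisect_left loop = PySem.List.bisectLeft)
def pvSumMin (n : Nat) (vals pre : List Int) (x : Int) : Int :=
  let k := PySem.List.bisectLeft vals x
  (PySem.List.pyGet? pre (Int.ofNat k)).getD 0 + x * ((n : Int) - (k : Int))

def subtract_timeouts_alt (possessions : List (Int × Int)) (timeouts : List (Int × Int)) : List Int :=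
  let valid := timeouts.filter (fun t => decide (t.1 < t.2))
  let starts := PySem.List.sorted (valid.map (fun t => t.1)) (fun x => x) false
  let stops := PySem.List.sorted (valid.map (fun t => t.2)) (fun x => x) false
  let preStarts := pvBuildPre starts
  let preStops := pvBuildPre stops
  let n := valid.length
  let cov := fun x => pvSumMin n stops preStops x - pvSumMin n starts preStarts x
  possessions.foldl (fun out p =>
    if p.1 ≤ p.2 then out ++ [(p.2 - p.1) - (cov p.2 - cov p.1)]
    else out ++ [p.2 - p.1]) []

-- ===== PRECONDITION & SPEC =====
def Spec_subtract_timeouts (possessions : List (Int × Int)) (timeouts : List (Int × Int)) (out : List Int) : Prop := out = subtract_timeouts_alt possessions timeouts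
instance (possessions : List (Int × Int)) (timeouts : List (Int × Int)) (out : List Int) : Decidable (Spec_subtract_timeouts possessions timeouts out) := by unfold Spec_subtract_timeouts; infer_instance

-- ===== CLAIM (what is proved, stated in full; the proofs are below) =====
def Claim_equal_subtract_timeouts : Prop := ∀ (possessions : List (Int × Int)) (timeouts : List (Int × Int)), Dom_subtract_timeouts possessions timeouts → Spec_subtract_timeouts possessions timeouts (subtract_timeouts possessions timeouts)

-- ===== LEMMAS AND PROOFS =====

-- total clamped overlap of possession p with the list of timeouts
def pvOv (p : Int × Int) (ts : List (Int × Int)) : Int :=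
  (ts.map (fun t => max 0 (min p.2 t.2 - max p.1 t.1))).sum

-- A's inner fold over timeouts subtracts exactly the clamped overlaps
theorem innerA_eq (ts : List (Int × Int)) (p : Int × Int) (d : Int) :
    ts.foldl (fun duration t =>
      let overlap_start := max p.1 t.1
      let overlap_end := min p.2 t.2
      if overlap_start < overlap_end then duration - (overlap_end - overlap_start) else duration)
      d = d - pvOv p ts := by
  induction ts generalizing d with
  | nil => simp [pvOv]
  | cons t ts ih =>
    simp only [List.foldl_cons, ih, pvOv, List.map_cons, List.sum_cons]
    split_ifs with h <;> omega

-- A is the map of the per-possession values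
theorem outerA_eq (ps ts : List (Int × Int)) :
    subtract_timeouts ps ts = ps.map (fun p => (p.2 - p.1) - pvOv p ts) := by
  unfold subtract_timeouts
  simp only [innerA_eq]
  exact PySem.List.foldl_append_singleton_eq_map _ ps []

-- running partial sums starting after accumulated value s
def pvPartials : List Int → Int → List Int
  | [], _ => []
  | v :: l, s => (s + v) :: pvPartials l (s + v)

theorem pvLast_append (acc : List Int) (a : Int) :
    (PySem.List.pyGet? (acc ++ [a]) (-1)).getD 0 = a := by
  simp [PySem.List.pyGet?, PySem.List.pyIdx?]

theorem pvPartials_length (l : List Int) (s : Int) : (pvPartials l s).length = l.length := by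
  induction l generalizing s with
  | nil => rfl
  | cons v l ih => simp [pvPartials, ih]

theorem pvBuildPre_go (l : List Int) (acc : List Int) (s : Int)
    (h : (PySem.List.pyGet? acc (-1)).getD 0 = s) :
    l.foldl (fun pre v => pre ++ [(PySem.List.pyGet? pre (-1)).getD 0 + v]) acc
      = acc ++ pvPartials l s := by
  induction l generalizing acc s with
  | nil => simp [pvPartials]
  | cons v l ih =>
    simp only [List.foldl_cons, h, pvPartials]
    rw [ih (acc ++ [s + v]) (s + v) (pvLast_append acc (s + v))]
    simp

theorem pvBuildPre_eq (vals : List Int) :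
    pvBuildPre vals = 0 :: pvPartials vals 0 := by
  unfold pvBuildPre
  rw [pvBuildPre_go vals [0] 0 (by decide)]
  rfl

theorem pvPartials_get (l : List Int) (s : Int) (k : Nat) (hk : k < l.length) :
    (pvPartials l s)[k]? = some (s + (l.take (k + 1)).sum) := by
  induction l generalizing s k with
  | nil => simp at hk
  | cons v l ih =>
    cases k with
    | zero => simp [pvPartials]
    | succ j =>
      simp only [pvPartials, List.getElem?_cons_succ]
      rw [ih (s + v) j (by simpa using hk)]
      simp [add_assoc]

theorem pvPre_get (vals : List Int) (k : Nat) (hk : k ≤ vals.length) :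
    (PySem.List.pyGet? (pvBuildPre vals) (Int.ofNat k)).getD 0 = (vals.take k).sum := by
  rw [pvBuildPre_eq]
  have hlen : (0 :: pvPartials vals 0).length = vals.length + 1 := by
    simp [pvPartials_length]
  simp only [PySem.List.pyGet?, PySem.List.pyIdx?, hlen]
  rw [if_pos (by simp [Int.ofNat_eq_natCast]), if_pos (by simp [Int.ofNat_eq_natCast]; omega)]
  simp only [Option.bind_some]
  cases k with
  | zero => simp
  | succ j =>
    have h1 : (Int.ofNat (j+1)).toNat = j + 1 := rfl
    rw [h1]
    simp only [List.getElem?_cons_succ]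
    rw [pvPartials_get vals 0 j (by omega)]
    simp

theorem pvSumMin_eq (vals : List Int) (x : Int) (hs : vals.Pairwise (· ≤ ·)) :
    pvSumMin vals.length vals (pvBuildPre vals) x = (vals.map (fun v => min x v)).sum := by
  obtain ⟨hk, hlt, hge⟩ := PySem.List.bisectLeft_spec vals x hs
  unfold pvSumMin
  simp only []
  rw [pvPre_get vals (PySem.List.bisectLeft vals x) hk]
  set k := PySem.List.bisectLeft vals x with hkdef
  have htake : (vals.take k).map (fun v => min x v) = vals.take k := by
    rw [show vals.take k = (vals.take k).map id from (List.map_id _).symm, List.map_map]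
    apply List.map_congr_left
    intro v hv
    simp only [Function.comp_apply, id_eq]
    obtain ⟨j, hj, rfl⟩ := List.mem_take_iff_getElem.mp hv
    have := hlt j (by omega) (by omega)
    omega
  have hdrop : (vals.drop k).map (fun v => min x v) = (vals.drop k).map (fun _ => x) := by
    apply List.map_congr_left
    intro v hv
    obtain ⟨j, hj, rfl⟩ := List.mem_iff_getElem.mp hv
    rw [List.getElem_drop]
    have := hge (k + j) (by simp at hj; omega) (by omega)
    omega
  calc (vals.take k).sum + x * ((vals.length : Int) - (k : Int))
      = ((vals.take k).map (fun v => min x v)).sum + ((vals.drop k).map (fun v => min x v)).sum := by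
        rw [htake, hdrop, PySem.List.sum_map_const_int]
        have hl : (vals.drop k).length = vals.length - k := by simp
        rw [hl]
        push_cast [Nat.cast_sub hk]
        ring
    _ = (vals.map (fun v => min x v)).sum := by
        rw [← List.sum_append, ← List.map_append, List.take_append_drop]

theorem pvCov_eq (l : List Int) (n : Nat) (hn : n = l.length) (x : Int) :
    pvSumMin n (PySem.List.sorted l (fun v => v) false)
      (pvBuildPre (PySem.List.sorted l (fun v => v) false)) x
    = (l.map (fun v => min x v)).sum := by
  have hlen : (PySem.List.sorted l (fun v => v) false).length = l.length :=
    List.Perm.length_eq (PySem.List.sorted_perm l (fun v => v) false)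
  rw [show n = (PySem.List.sorted l (fun v => v) false).length by omega]
  rw [pvSumMin_eq _ x (PySem.List.sorted_pairwise l (fun v => v))]
  exact List.Perm.sum_eq (List.Perm.map _ (PySem.List.sorted_perm l (fun v => v) false))

-- pvOv only sees the valid timeouts
theorem pvOv_filter (p : Int × Int) (ts : List (Int × Int)) :
    pvOv p ts = pvOv p (ts.filter (fun t => decide (t.1 < t.2))) := by
  induction ts with
  | nil => rfl
  | cons t ts ih =>
    by_cases h : t.1 < t.2
    · simp [pvOv, h] at ih ⊢; omega
    · have hz : max 0 (min p.2 t.2 - max p.1 t.1) = 0 := by omega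
      simp [pvOv, h, hz] at ih ⊢; omega

theorem pvOv_neg (p : Int × Int) (ts : List (Int × Int)) (h : p.2 < p.1) :
    pvOv p ts = 0 := by
  induction ts with
  | nil => rfl
  | cons t ts ih =>
    have hz : max 0 (min p.2 t.2 - max p.1 t.1) = 0 := by omega
    simp [pvOv, hz] at ih ⊢; omega

theorem pvOv_valid (p : Int × Int) (l : List (Int × Int)) (h : p.1 ≤ p.2)
    (hv : ∀ t ∈ l, t.1 < t.2) :
    pvOv p l = ((l.map (fun t => min p.2 t.2)).sum - (l.map (fun t => min p.2 t.1)).sum)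
             - ((l.map (fun t => min p.1 t.2)).sum - (l.map (fun t => min p.1 t.1)).sum) := by
  induction l with
  | nil => simp [pvOv]
  | cons t l ih =>
    have ht := hv t (by simp)
    have ihl := ih (fun t ht' => hv t (by simp [ht']))
    simp only [pvOv, List.map_cons, List.sum_cons] at ihl ⊢
    omega

-- ===== VERDICT (by name: the statement is the Claim_ definition above) =====
theorem subtract_timeouts_spec : Claim_equal_subtract_timeouts := by
  intro ps ts _
  unfold Spec_subtract_timeouts
  rw [outerA_eq]
  unfold subtract_timeouts_alt
  simp only []
  rw [show (fun (out : List Int) (p : Int × Int) =>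
        if p.1 ≤ p.2 then out ++ [(p.2 - p.1) -
          ((pvSumMin (ts.filter (fun t => decide (t.1 < t.2))).length
              (PySem.List.sorted ((ts.filter (fun t => decide (t.1 < t.2))).map (fun t => t.2)) (fun x => x) false)
              (pvBuildPre (PySem.List.sorted ((ts.filter (fun t => decide (t.1 < t.2))).map (fun t => t.2)) (fun x => x) false)) p.2
            - pvSumMin (ts.filter (fun t => decide (t.1 < t.2))).length
              (PySem.List.sorted ((ts.filter (fun t => decide (t.1 < t.2))).map (fun t => t.1)) (fun x => x) false)
              (pvBuildPre (PySem.List.sorted ((ts.filter (fun t => decide (t.1 < t.2))).map (fun t => t.1)) (fun x => x) false)) p.2)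
          - (pvSumMin (ts.filter (fun t => decide (t.1 < t.2))).length
              (PySem.List.sorted ((ts.filter (fun t => decide (t.1 < t.2))).map (fun t => t.2)) (fun x => x) false)
              (pvBuildPre (PySem.List.sorted ((ts.filter (fun t => decide (t.1 < t.2))).map (fun t => t.2)) (fun x => x) false)) p.1
            - pvSumMin (ts.filter (fun t => decide (t.1 < t.2))).length
              (PySem.List.sorted ((ts.filter (fun t => decide (t.1 < t.2))).map (fun t => t.1)) (fun x => x) false)
              (pvBuildPre (PySem.List.sorted ((ts.filter (fun t => decide (t.1 < t.2))).map (fun t => t.1)) (fun x => x) false)) p.1))]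
        else out ++ [p.2 - p.1]) = fun out p => out ++ [if p.1 ≤ p.2 then (p.2 - p.1) -
          ((pvSumMin (ts.filter (fun t => decide (t.1 < t.2))).length
              (PySem.List.sorted ((ts.filter (fun t => decide (t.1 < t.2))).map (fun t => t.2)) (fun x => x) false)
              (pvBuildPre (PySem.List.sorted ((ts.filter (fun t => decide (t.1 < t.2))).map (fun t => t.2)) (fun x => x) false)) p.2
            - pvSumMin (ts.filter (fun t => decide (t.1 < t.2))).length
              (PySem.List.sorted ((ts.filter (fun t => decide (t.1 < t.2))).map (fun t => t.1)) (fun x => x) false)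
              (pvBuildPre (PySem.List.sorted ((ts.filter (fun t => decide (t.1 < t.2))).map (fun t => t.1)) (fun x => x) false)) p.2)
          - (pvSumMin (ts.filter (fun t => decide (t.1 < t.2))).length
              (PySem.List.sorted ((ts.filter (fun t => decide (t.1 < t.2))).map (fun t => t.2)) (fun x => x) false)
              (pvBuildPre (PySem.List.sorted ((ts.filter (fun t => decide (t.1 < t.2))).map (fun t => t.2)) (fun x => x) false)) p.1
            - pvSumMin (ts.filter (fun t => decide (t.1 < t.2))).length
              (PySem.List.sorted ((ts.filter (fun t => decide (t.1 < t.2))).map (fun t => t.1)) (fun x => x) false)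
              (pvBuildPre (PySem.List.sorted ((ts.filter (fun t => decide (t.1 < t.2))).map (fun t => t.1)) (fun x => x) false)) p.1))
        else p.2 - p.1] from by funext out p; split_ifs <;> rfl]
  rw [PySem.List.foldl_append_singleton_eq_map, List.nil_append]
  apply List.map_congr_left
  intro p _
  rw [pvCov_eq _ _ (by simp), pvCov_eq _ _ (by simp), pvCov_eq _ _ (by simp), pvCov_eq _ _ (by simp)]
  by_cases h : p.1 ≤ p.2
  · rw [if_pos h, pvOv_filter,
      pvOv_valid p _ h (fun t ht => by simpa using (List.mem_filter.mp ht).2)]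
    simp [List.map_map, Function.comp_def]
  · rw [if_neg h, pvOv_neg p ts (by omega)]
    ring
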